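-- pv_equiv track=rewrite | github.com/jimtete/dtu-process-mining | exercise-2/exercise-2.py | dependency_graph_inline
-- ===== SOURCE A (Python) =====
-- from collections import defaultdict
--
-- def dependency_graph_inline(log: dict) -> dict:
--     df = defaultdict(lambda: defaultdict(int))
--
--     for events in log.values():
--         for idx in range(len(events) - 1):
--             src = events[idx]["task"]
--             tgt = events[idx + 1]["task"]
--             df[src][tgt] += 1
--
--     return {src: dict(tgts) for src, tgts in df.items()}
-- ===== SOURCE B (Python) =====
-- def dependency_graph_inline(log: dict) -> dict:
--     # materialize the whole directly-follows pair stream, then count declaratively: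
--     # no running counter dict; each count is a pairs.count scan, order = first occurrence
--     pairs = [(a["task"], b["task"])
--              for events in log.values()
--              for a, b in zip(events, events[1:])]
--     return {s: {t: pairs.count((s, t))
--                 for t in dict.fromkeys(t for x, t in pairs if x == s)}
--             for s in dict.fromkeys(s for s, _ in pairs)}
-- ===== Notes on version B (the rewrite author's own statement) =====
-- stated objective: alternative
-- what changed: B builds the full directly-follows pair list once and constructs the nested dict declaratively -- distinct sources/targets via dict.fromkeys in first-occurrence order, each count computed by a pairs.count scan -- instead of A's single pass that increments a nested defaultdict per indexed pair; it trades A's O(n) hash counting for scan-based counting.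
import Mathlib
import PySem

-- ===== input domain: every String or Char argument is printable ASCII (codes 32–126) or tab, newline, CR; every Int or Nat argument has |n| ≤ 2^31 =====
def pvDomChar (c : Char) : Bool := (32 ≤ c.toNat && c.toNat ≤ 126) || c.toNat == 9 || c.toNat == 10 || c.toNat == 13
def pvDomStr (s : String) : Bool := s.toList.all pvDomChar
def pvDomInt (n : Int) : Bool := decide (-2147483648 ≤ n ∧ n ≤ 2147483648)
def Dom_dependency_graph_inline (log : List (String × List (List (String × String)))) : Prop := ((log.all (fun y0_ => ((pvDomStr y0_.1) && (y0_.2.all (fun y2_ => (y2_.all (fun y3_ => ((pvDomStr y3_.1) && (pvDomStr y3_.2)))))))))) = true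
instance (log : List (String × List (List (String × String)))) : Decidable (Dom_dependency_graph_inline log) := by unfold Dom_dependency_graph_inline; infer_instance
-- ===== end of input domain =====

-- B materializes the whole directly-follows pair list once and builds the nested result
-- declaratively (distinct keys in first-occurrence order, counts by pairs.count scans);
-- A increments a nested defaultdict per indexed pair in one pass.  Same return value;
-- neither mutates its argument.

-- ===== PORT A =====
def dependency_graph_inline (log : List (String × List (List (String × String)))) : List (String × List (String × Int)) :=
  let df : PySem.Dict String (PySem.Dict String Int) :=
    ((PySem.Dict.ofList log).values).foldl (fun df events =>
      (PySem.List.pyRange 0 ((events.length : Int) - 1) 1).foldl (fun df idx =>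
        let src := (PySem.Dict.ofList (PySem.List.pyGetD events idx [])).getD "task" ""
        let tgt := (PySem.Dict.ofList (PySem.List.pyGetD events (idx + 1) [])).getD "task" ""
        df.insert src ((df.getD src PySem.Dict.empty).insert tgt
          ((df.getD src PySem.Dict.empty).getD tgt 0 + 1))) df)
      PySem.Dict.empty
  df.items.map (fun p => (p.1, p.2.items))

-- ===== PORT B =====
def dependency_graph_inline_alt (log : List (String × List (List (String × String)))) : List (String × List (String × Int)) :=
  let pairs : List (String × String) :=
    ((PySem.Dict.ofList log).values).flatMap (fun events =>
      (events.zip (events.drop 1)).map (fun ab =>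
        ((PySem.Dict.ofList ab.1).getD "task" "", (PySem.Dict.ofList ab.2).getD "task" "")))
  (PySem.Set.ofList (pairs.map Prod.fst)).map (fun s =>
    (s, (PySem.Set.ofList ((pairs.filter (fun p => p.1 == s)).map Prod.snd)).map
          (fun t => (t, (pairs.count (s, t) : Int)))))

-- ===== PRECONDITION & SPEC =====
-- Pre_ excludes exactly the inputs on which Python A raises KeyError: some event of a trace with
-- at least two events (all of which the pair loop subscripts) lacks the "task" key.
def Pre_dependency_graph_inline (log : List (String × List (List (String × String)))) : Prop :=
  ∀ tr ∈ (PySem.Dict.ofList log).values, 2 ≤ tr.length →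
    ∀ ev ∈ tr, (PySem.Dict.ofList ev).contains "task" = true
instance (log : List (String × List (List (String × String)))) : Decidable (Pre_dependency_graph_inline log) := by unfold Pre_dependency_graph_inline; infer_instance

def pvWitness_dependency_graph_inline : (List (String × List (List (String × String)))) :=
  [("case1", [[("task", "a")], [("task", "b")], [("task", "a")]])]

def Spec_dependency_graph_inline (log : List (String × List (List (String × String)))) (out : List (String × List (String × Int))) : Prop := out = dependency_graph_inline_alt log
instance (log : List (String × List (List (String × String)))) (out : List (String × List (String × Int))) : Decidable (Spec_dependency_graph_inline log out) := by unfold Spec_dependency_graph_inline; infer_instance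

-- ===== CLAIM (what is proved, stated in full; the proofs are below) =====
def Claim_equal_dependency_graph_inline : Prop := ∀ (log : List (String × List (List (String × String)))), Dom_dependency_graph_inline log → Pre_dependency_graph_inline log → Spec_dependency_graph_inline log (dependency_graph_inline log)

-- ===== LEMMAS AND PROOFS =====

-- the "task" label of one event dict (shared shape of both ports' lookups)
def pvTask (ev : List (String × String)) : String := (PySem.Dict.ofList ev).getD "task" ""

-- the directly-follows pair stream of one trace
def pvPairs (tr : List (List (String × String))) : List (String × String) :=
  (tr.zip (tr.drop 1)).map (fun ab => (pvTask ab.1, pvTask ab.2))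

-- A's nested accumulation step
def pvAStep (d : PySem.Dict String (PySem.Dict String Int)) (p : String × String) :
    PySem.Dict String (PySem.Dict String Int) :=
  d.insert p.1 ((d.getD p.1 PySem.Dict.empty).insert p.2
    ((d.getD p.1 PySem.Dict.empty).getD p.2 0 + 1))

-- closed form: the nested directly-follows dict of a pair stream
def pvInner (ps : List (String × String)) (s : String) : PySem.Dict String Int :=
  PySem.Dict.mk ((PySem.Set.ofList ((ps.filter (fun q => q.1 == s)).map Prod.snd)).map
    (fun t => (t, (ps.count (s, t) : Int))))

def pvF (ps : List (String × String)) : PySem.Dict String (PySem.Dict String Int) :=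
  PySem.Dict.mk ((PySem.Set.ofList (ps.map Prod.fst)).map (fun s => (s, pvInner ps s)))

theorem pv_count_append_ne (ps : List (String × String)) (p q : String × String) (h : p ≠ q) :
    (ps ++ [p]).count q = ps.count q := by
  rw [List.count_append, List.count_singleton]
  simp only [beq_iff_eq, if_neg h, add_zero]

theorem pv_inner_append_ne (ps : List (String × String)) (p : String × String) (s : String)
    (h : p.1 ≠ s) : pvInner (ps ++ [p]) s = pvInner ps s := by
  unfold pvInner
  have hf : (ps ++ [p]).filter (fun q => q.1 == s) = ps.filter (fun q => q.1 == s) := by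
    rw [List.filter_append, List.filter_singleton]
    have : (p.1 == s) = false := by simpa using h
    rw [this, Bool.cond_false, List.append_nil]
  rw [hf]
  congr 1
  apply List.map_congr_left
  intro t' _
  have := pv_count_append_ne ps p (s, t') (fun c => h (by rw [c]))
  rw [this]

theorem pv_getD_mk_map {ν : Type} (S : List String) (g : String → ν) (s : String) (dflt : ν) :
    (PySem.Dict.mk (S.map (fun a => (a, g a)))).getD s dflt = if s ∈ S then g s else dflt := by
  induction S with
  | nil => simp [PySem.Dict.getD, PySem.Dict.get?]
  | cons a S ih =>
    simp only [List.map_cons, PySem.Dict.getD_eq_get?_getD, PySem.Dict.get?_mk_cons]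
    by_cases hs : a = s
    · subst hs; simp
    · rw [PySem.Dict.getD_eq_get?_getD] at ih
      simp [beq_iff_eq, hs, ih, Ne.symm hs]

theorem pv_insert_mk_map_mem {ν : Type} (S : List String) (g : String → ν) (s : String) (v : ν)
    (h : s ∈ S) :
    (PySem.Dict.mk (S.map (fun a => (a, g a)))).insert s v
      = PySem.Dict.mk (S.map (fun a => (a, if a = s then v else g a))) := by
  apply PySem.Dict.ext
  rw [PySem.Dict.items_insert_of_contains]
  · simp only [List.map_map]
    apply List.map_congr_left
    intro a _
    by_cases ha : a = s
    · subst ha; simp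
    · simp [ha]
  · rw [PySem.Dict.contains_mk]
    simp only [List.any_map, List.any_eq_true]
    exact ⟨s, h, by simp⟩

theorem pv_insert_mk_map_not_mem {ν : Type} (S : List String) (g : String → ν) (s : String) (v : ν)
    (h : s ∉ S) :
    (PySem.Dict.mk (S.map (fun a => (a, g a)))).insert s v
      = PySem.Dict.mk (S.map (fun a => (a, g a)) ++ [(s, v)]) := by
  apply PySem.Dict.ext
  rw [PySem.Dict.items_insert_of_not_contains]
  rw [PySem.Dict.contains_mk]
  simp only [List.any_map, List.any_eq_false, Function.comp, beq_iff_eq]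
  exact fun a ha he => h (he ▸ ha)

theorem pv_ofList_append_singleton {α : Type} [BEq α] [LawfulBEq α] (xs : List α) (x : α) :
    PySem.Set.ofList (xs ++ [x])
      = if x ∈ PySem.Set.ofList xs then PySem.Set.ofList xs else PySem.Set.ofList xs ++ [x] := by
  rw [PySem.Set.ofList_eq_foldl, List.foldl_append, ← PySem.Set.ofList_eq_foldl]
  simp only [List.foldl_cons, List.foldl_nil, PySem.Set.add, PySem.Set.contains]
  split_ifs with h1 h2 h2 <;> try rfl
  · exact absurd (List.contains_iff_mem.mp h1) h2
  · exact absurd (List.contains_iff_mem.mpr h2) (by simpa using h1)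

theorem pv_mem_snd_filter (ps : List (String × String)) (s t : String) :
    t ∈ PySem.Set.ofList ((ps.filter (fun q => q.1 == s)).map Prod.snd) ↔ (s, t) ∈ ps := by
  rw [PySem.Set.mem_ofList]
  simp only [List.mem_map, List.mem_filter, beq_iff_eq]
  constructor
  · rintro ⟨r, ⟨hr, h1⟩, h2⟩; rwa [← h1, ← h2]
  · intro h; exact ⟨(s, t), ⟨h, rfl⟩, rfl⟩

theorem pv_mem_fst (ps : List (String × String)) (s : String) :
    s ∈ PySem.Set.ofList (ps.map Prod.fst) ↔ ∃ u, (s, u) ∈ ps := by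
  rw [PySem.Set.mem_ofList]
  simp only [List.mem_map]
  constructor
  · rintro ⟨q, hq, h1⟩; exact ⟨q.2, by rwa [← h1]⟩
  · rintro ⟨u, hu⟩; exact ⟨(s, u), hu, rfl⟩

theorem pv_filter_append_self (ps : List (String × String)) (s t : String) :
    (ps ++ [(s, t)]).filter (fun q => q.1 == s) = ps.filter (fun q => q.1 == s) ++ [(s, t)] := by
  rw [List.filter_append, List.filter_singleton]
  simp

theorem pv_count_append_self (ps : List (String × String)) (s t : String) :
    (ps ++ [(s, t)]).count (s, t) = ps.count (s, t) + 1 := by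
  rw [List.count_append, List.count_singleton]
  simp

-- inner dict at the inserted source
theorem pv_inner_append_self (ps : List (String × String)) (s t : String) :
    pvInner (ps ++ [(s, t)]) s
      = PySem.Dict.mk
          ((if t ∈ PySem.Set.ofList ((ps.filter (fun q => q.1 == s)).map Prod.snd)
            then PySem.Set.ofList ((ps.filter (fun q => q.1 == s)).map Prod.snd)
            else PySem.Set.ofList ((ps.filter (fun q => q.1 == s)).map Prod.snd) ++ [t]).map
            (fun t' => (t', if t' = t then (ps.count (s, t) : Int) + 1 else (ps.count (s, t') : Int)))) := by
  unfold pvInner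
  rw [pv_filter_append_self, List.map_append, List.map_singleton, pv_ofList_append_singleton]
  congr 1
  apply List.map_congr_left
  intro t' _
  by_cases ht' : t' = t
  · subst ht'
    rw [if_pos rfl, pv_count_append_self]
    push_cast
    ring_nf
  · rw [if_neg ht', pv_count_append_ne ps (s, t) (s, t') (by simp [Ne.symm ht'])]

theorem pv_astep_F (ps : List (String × String)) (p : String × String) :
    pvAStep (pvF ps) p = pvF (ps ++ [p]) := by
  obtain ⟨s, t⟩ := p
  unfold pvAStep pvF
  rw [pv_getD_mk_map]
  by_cases hs : s ∈ PySem.Set.ofList (ps.map Prod.fst)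
  · rw [if_pos hs]
    have hS' : PySem.Set.ofList ((ps ++ [(s, t)]).map Prod.fst)
        = PySem.Set.ofList (ps.map Prod.fst) := by
      rw [List.map_append, List.map_singleton, pv_ofList_append_singleton, if_pos hs]
    show (PySem.Dict.mk _).insert s _ = _
    rw [show pvInner ps s = PySem.Dict.mk
          ((PySem.Set.ofList ((ps.filter (fun q => q.1 == s)).map Prod.snd)).map
            (fun t' => (t', (ps.count (s, t') : Int)))) from rfl]
    rw [pv_getD_mk_map]
    by_cases ht : t ∈ PySem.Set.ofList ((ps.filter (fun q => q.1 == s)).map Prod.snd)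
    · rw [if_pos ht, pv_insert_mk_map_mem _ _ _ _ ht, pv_insert_mk_map_mem _ _ _ _ hs, hS']
      apply PySem.Dict.ext
      show List.map _ _ = List.map _ _
      apply List.map_congr_left
      intro a _
      by_cases ha : a = s
      · subst ha
        rw [if_pos rfl, pv_inner_append_self, if_pos ht]
      · rw [if_neg ha, pv_inner_append_ne ps (s, t) a (by simpa using Ne.symm ha)]
    · rw [if_neg ht, pv_insert_mk_map_not_mem _ _ _ _ ht, pv_insert_mk_map_mem _ _ _ _ hs, hS']
      apply PySem.Dict.ext
      show List.map _ _ = List.map _ _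
      apply List.map_congr_left
      intro a _
      by_cases ha : a = s
      · subst ha
        rw [if_pos rfl, pv_inner_append_self, if_neg ht]
        have hc0 : ps.count (a, t) = 0 :=
          List.count_eq_zero.mpr (fun c => ht ((pv_mem_snd_filter ps a t).mpr c))
        congr 1
        rw [List.map_append, List.map_singleton]
        have hmap := List.map_congr_left
          (l := PySem.Set.ofList ((ps.filter (fun q => q.1 == a)).map Prod.snd))
          (f := fun t' => (t', (ps.count (a, t') : Int)))
          (g := fun t' => (t', if t' = t then (ps.count (a, t) : Int) + 1 else (ps.count (a, t') : Int)))
          (fun t' ht' => by simp only []; rw [if_neg (fun c : t' = t => ht (c ▸ ht'))])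
        rw [hmap]
        have hsing : [(t, (0 : Int) + 1)]
            = [(t, if t = t then (ps.count (a, t) : Int) + 1 else (ps.count (a, t) : Int))] := by
          rw [if_pos rfl, hc0]
          norm_num
        rw [hsing]
      · rw [if_neg ha, pv_inner_append_ne ps (s, t) a (by simpa using Ne.symm ha)]
  · rw [if_neg hs, pv_insert_mk_map_not_mem _ _ _ _ hs]
    have hfilter : ps.filter (fun q => q.1 == s) = [] := by
      rw [List.filter_eq_nil_iff]
      intro q hq
      simp only [beq_iff_eq]
      intro hq1
      exact hs ((pv_mem_fst ps s).mpr ⟨q.2, by rw [← hq1]; simpa using hq⟩)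
    have hS' : PySem.Set.ofList ((ps ++ [(s, t)]).map Prod.fst)
        = PySem.Set.ofList (ps.map Prod.fst) ++ [s] := by
      rw [List.map_append, List.map_singleton, pv_ofList_append_singleton, if_neg hs]
    apply PySem.Dict.ext
    show List.map _ _ ++ _ = List.map _ _
    rw [hS', List.map_append, List.map_singleton]
    congr 1
    · apply List.map_congr_left
      intro a ha
      have hne : s ≠ a := fun c => hs (c ▸ ha)
      rw [pv_inner_append_ne ps (s, t) a (by simpa using hne)]
    · have hinner : pvInner (ps ++ [(s, t)]) s = PySem.Dict.mk [(t, (0 : Int) + 1)] := by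
        unfold pvInner
        rw [pv_filter_append_self, hfilter, List.nil_append, List.map_singleton]
        have hset : PySem.Set.ofList [t] = [t] := rfl
        rw [hset, List.map_singleton, pv_count_append_self]
        have hc : ps.count (s, t) = 0 := by
          refine List.count_eq_zero.mpr (fun c => ?_)
          have h2 := (pv_mem_snd_filter ps s t).mpr c
          rw [hfilter] at h2
          simp at h2
        rw [hc]
        norm_num
      rw [hinner]
      rw [PySem.Dict.getD_empty]
      rfl

theorem pv_foldl_astep (ps : List (String × String)) :
    ps.foldl pvAStep PySem.Dict.empty = pvF ps := by
  induction ps using List.reverseRecOn with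
  | nil => rfl
  | append_singleton ps p ih => rw [List.foldl_append, List.foldl_cons, List.foldl_nil, ih, pv_astep_F]

theorem pv_range_zip {α : Type} (tr : List α) (d : α) :
    (List.range (tr.length - 1)).map (fun k => (tr.getD k d, tr.getD (k + 1) d))
      = tr.zip (tr.drop 1) := by
  apply List.ext_getElem
  · simp [List.length_zip]
  · intro i h1 h2
    simp only [List.getElem_map, List.getElem_range, List.getElem_zip, List.getElem_drop]
    have hi : i < tr.length - 1 := by simpa using h1
    have e1 : tr.getD i d = tr[i] := List.getD_eq_getElem tr d (by omega)
    have e2 : tr.getD (i + 1) d = tr[i + 1] := List.getD_eq_getElem tr d (by omega)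
    rw [e1, e2]
    exact Prod.ext rfl (by simp [Nat.add_comm])

theorem pv_inner_range (tr : List (List (String × String)))
    (g : PySem.Dict String (PySem.Dict String Int) → (String × String) → PySem.Dict String (PySem.Dict String Int))
    (init : PySem.Dict String (PySem.Dict String Int)) :
    (PySem.List.pyRange 0 ((tr.length : Int) - 1) 1).foldl (fun d idx =>
        g d (pvTask (PySem.List.pyGetD tr idx []), pvTask (PySem.List.pyGetD tr (idx + 1) []))) init
      = (pvPairs tr).foldl g init := by
  rw [PySem.List.pyRange_one, List.foldl_map]
  have hm : (((tr.length : Int) - 1) - 0).toNat = tr.length - 1 := by omega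
  rw [hm]
  have hcong : ∀ (acc : PySem.Dict String (PySem.Dict String Int)), ∀ k ∈ List.range (tr.length - 1),
      g acc (pvTask (PySem.List.pyGetD tr (0 + (k : Int)) []),
             pvTask (PySem.List.pyGetD tr ((0 + (k : Int)) + 1) []))
        = g acc (pvTask (tr.getD k []), pvTask (tr.getD (k + 1) [])) := by
    intro acc k _
    have e1 : (0 + (k : Int)) = ((k : Nat) : Int) := by omega
    have e2 : ((k : Int) + 1) = (((k + 1 : Nat)) : Int) := by push_cast; ring
    rw [e1, e2, PySem.List.pyGetD_natCast, PySem.List.pyGetD_natCast]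
  rw [PySem.List.foldl_congr_mem _ _ _ init hcong]
  rw [← List.foldl_map (f := fun k => (pvTask (tr.getD k []), pvTask (tr.getD (k + 1) []))) (g := g)]
  congr 1
  unfold pvPairs
  rw [← pv_range_zip tr ([] : List (String × String)), List.map_map]
  rfl

theorem pv_foldl_flatMap {α β σ : Type} (f : α → List β) (g : σ → β → σ) (l : List α) (init : σ) :
    l.foldl (fun acc x => (f x).foldl g acc) init = (l.flatMap f).foldl g init := by
  induction l generalizing init with
  | nil => rfl
  | cons x l ih => simp [List.flatMap_cons, List.foldl_append, ih]

-- ===== VERDICT (by name: the statement is the Claim_ definition above) =====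
theorem dependency_graph_inline_spec : Claim_equal_dependency_graph_inline := by
  intro log _ _
  unfold Spec_dependency_graph_inline
  show (((PySem.Dict.ofList log).values).foldl (fun df events =>
        (PySem.List.pyRange 0 ((events.length : Int) - 1) 1).foldl (fun d idx =>
          pvAStep d (pvTask (PySem.List.pyGetD events idx []),
                     pvTask (PySem.List.pyGetD events (idx + 1) []))) df)
        PySem.Dict.empty).items.map (fun p => (p.1, p.2.items))
    = dependency_graph_inline_alt log
  rw [PySem.List.foldl_congr_mem _ _ (fun df events => (pvPairs events).foldl pvAStep df)
      PySem.Dict.empty (fun acc ev _ => pv_inner_range ev pvAStep acc)]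
  rw [pv_foldl_flatMap pvPairs pvAStep, pv_foldl_astep]
  show (pvF ((PySem.Dict.ofList log).values.flatMap pvPairs)).items.map (fun p => (p.1, p.2.items)) = _
  unfold dependency_graph_inline_alt pvF pvInner
  rw [List.map_map]
  rfl
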